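-- pv_equiv track=rewrite | github.com/kamilGie/WDI | Zestaw_1:_Proste_programy_z_pętlami/32/rozwiazanie32.py | Zadanie_32
-- ===== SOURCE A (Python) =====
-- def Zadanie_32(n):
--     ostatnie_d = 10
--     while n > 0:
--         n, d = divmod(n, 10)
--         if ostatnie_d <= d:
--             return False
--         ostatnie_d = d
--     return True
-- ===== SOURCE B (Python) =====
-- def Zadanie_32(n):
--     if n <= 0:
--         return True
--     s = str(n)
--     return all(a < b for a, b in zip(s, s[1:]))
-- ===== Notes on version B (the rewrite author's own statement) =====
-- stated objective: idiomatic
-- what changed: Replaced the LSB-first divmod extraction loop with a running 'previous digit' variable by converting to str(n) and checking adjacent characters are strictly increasing with all/zip.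
import Mathlib
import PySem

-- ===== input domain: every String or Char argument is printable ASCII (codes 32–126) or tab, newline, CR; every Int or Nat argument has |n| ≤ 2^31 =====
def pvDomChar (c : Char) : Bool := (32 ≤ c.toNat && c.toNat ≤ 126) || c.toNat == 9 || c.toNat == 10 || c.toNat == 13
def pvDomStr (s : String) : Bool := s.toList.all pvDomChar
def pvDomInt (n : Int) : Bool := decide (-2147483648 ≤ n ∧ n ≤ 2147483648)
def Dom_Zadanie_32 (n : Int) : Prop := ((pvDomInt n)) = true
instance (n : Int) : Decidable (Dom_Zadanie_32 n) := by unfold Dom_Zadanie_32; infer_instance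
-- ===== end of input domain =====

-- B converts the number to its decimal string and checks that adjacent characters are
-- strictly increasing, instead of A's LSB-first divmod loop with a 'previous digit' variable.

-- ===== PORT A =====
-- the while loop of A: state (n, ostatnie_d)
def zadALoop (n last : Int) : Bool :=
  if _h : n > 0 then
    let q := PySem.Int.floordiv n 10
    let d := PySem.Int.mod n 10
    if last ≤ d then false
    else zadALoop q d
  else true
termination_by n.toNat
decreasing_by
  have h10 : PySem.Int.floordiv n 10 = n / 10 := PySem.Int.floordiv_eq_ediv_of_pos (by omega)
  rw [h10]
  omega

def Zadanie_32 (n : Int) : Bool := zadALoop n 10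

-- ===== PORT B =====
-- all(a < b for a, b in zip(s, s[1:])): adjacent-pair strict increase check
def zadBChain : List Char → Bool
  | a :: b :: rest => decide (a < b) && zadBChain (b :: rest)
  | _ => true

def Zadanie_32_alt (n : Int) : Bool :=
  if n ≤ 0 then true
  else zadBChain (PySem.Int.toStr n).toList

-- ===== PRECONDITION & SPEC =====
def Spec_Zadanie_32 (n : Int) (out : Bool) : Prop := out = Zadanie_32_alt n
instance (n : Int) (out : Bool) : Decidable (Spec_Zadanie_32 n out) := by unfold Spec_Zadanie_32; infer_instance

-- ===== CLAIM (what is proved, stated in full; the proofs are below) =====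
def Claim_equal_Zadanie_32 : Prop := ∀ (n : Int), Dom_Zadanie_32 n → Spec_Zadanie_32 n (Zadanie_32 n)

-- ===== LEMMAS AND PROOFS =====

-- canonical MSB-first decimal digit characters of a positive Nat
def pvDigs (m : Nat) : List Char :=
  if _h : m < 10 then [Nat.digitChar m]
  else pvDigs (m / 10) ++ [Nat.digitChar (m % 10)]
decreasing_by omega

lemma toDigitsCore_acc (f : Nat) : ∀ (n : Nat) (acc : List Char),
    Nat.toDigitsCore 10 f n acc = Nat.toDigitsCore 10 f n [] ++ acc := by
  induction f with
  | zero => intro n acc; simp [Nat.toDigitsCore]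
  | succ f ih =>
    intro n acc
    simp only [Nat.toDigitsCore]
    by_cases h : n / 10 = 0
    · simp [h]
    · simp only [h, if_false]
      rw [ih (n / 10) (Nat.digitChar (n % 10) :: acc),
          ih (n / 10) [Nat.digitChar (n % 10)]]
      simp

lemma toDigitsCore_eq_pvDigs : ∀ (f n : Nat), n < f →
    Nat.toDigitsCore 10 f n [] = pvDigs n := by
  intro f
  induction f with
  | zero => intro n h; omega
  | succ f ih =>
    intro n h
    simp only [Nat.toDigitsCore]
    by_cases h10 : n / 10 = 0
    · have hn : n < 10 := by omega
      rw [pvDigs]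
      simp [h10, hn, Nat.mod_eq_of_lt hn]
    · have hn : ¬ n < 10 := by omega
      rw [toDigitsCore_acc, ih (n / 10) (by omega)]
      conv_rhs => rw [pvDigs]
      simp [hn]

lemma toDigits_eq_pvDigs (n : Nat) : Nat.toDigits 10 n = pvDigs n :=
  toDigitsCore_eq_pvDigs (n + 1) n (by omega)

lemma digitChar_lt_iff : ∀ a : Nat, a < 11 → ∀ b : Nat, b < 11 →
    (decide (Nat.digitChar a < Nat.digitChar b) = decide (a < b)) := by decide

lemma digitChar_lt_a : ∀ a : Nat, a < 10 → Nat.digitChar a < 'a' := by decide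

lemma pvDigs_mem_lt (m : Nat) : ∀ c ∈ pvDigs m, c < 'a' := by
  induction m using Nat.strong_induction_on with
  | _ m ih =>
    intro c hc
    rw [pvDigs] at hc
    by_cases h : m < 10
    · simp [h] at hc
      subst hc; exact digitChar_lt_a m h
    · simp [h] at hc
      rcases hc with hc | hc
      · exact ih (m / 10) (by omega) c hc
      · subst hc; exact digitChar_lt_a (m % 10) (by omega)

lemma zadBChain_append2 (a b : Char) : ∀ xs : List Char,
    zadBChain (xs ++ [a, b]) = (zadBChain (xs ++ [a]) && decide (a < b)) := by
  intro xs
  induction xs with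
  | nil => simp [zadBChain, Bool.and_comm]
  | cons x xs ih =>
    cases xs with
    | nil => simp [zadBChain, Bool.and_comm]
    | cons y ys =>
      simp only [List.cons_append, zadBChain] at *
      rw [ih, Bool.and_assoc]

lemma zadBChain_append_big : ∀ xs : List Char, (∀ c ∈ xs, c < 'a') →
    zadBChain (xs ++ ['a']) = zadBChain xs := by
  intro xs
  induction xs with
  | nil => intro _; simp [zadBChain]
  | cons x xs ih =>
    intro h
    cases xs with
    | nil => simp [zadBChain, h x (by simp)]
    | cons y ys =>
      simp only [List.cons_append, zadBChain] at *
      rw [ih (fun c hc => h c (by simp [hc]))]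

lemma pvDigs_split (m : Nat) :
    ∃ xs, pvDigs m = xs ++ [Nat.digitChar (m % 10)] := by
  rw [pvDigs]
  by_cases h : m < 10
  · exact ⟨[], by simp [h, Nat.mod_eq_of_lt h]⟩
  · exact ⟨pvDigs (m / 10), by simp [h]⟩

lemma zadALoop_eq_chain : ∀ m : Nat, 0 < m → ∀ l : Nat, l ≤ 10 →
    zadALoop (m : Int) (l : Int) = zadBChain (pvDigs m ++ [Nat.digitChar l]) := by
  intro m
  induction m using Nat.strong_induction_on with
  | _ m ih =>
    intro hm l hl
    rw [zadALoop]
    have hpos : (m : Int) > 0 := by exact_mod_cast hm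
    simp only [hpos, dif_pos]
    have hfd : PySem.Int.floordiv (m : Int) 10 = ((m / 10 : Nat) : Int) :=
      PySem.Int.floordiv_natCast m 10
    have hmd : PySem.Int.mod (m : Int) 10 = ((m % 10 : Nat) : Int) :=
      PySem.Int.mod_natCast m 10
    obtain ⟨xs, hxs⟩ := pvDigs_split m
    by_cases hle : l ≤ m % 10
    · have : ((l : Int) ≤ PySem.Int.mod (m : Int) 10) := by rw [hmd]; exact_mod_cast hle
      simp only [this, if_pos]
      rw [hxs, List.append_assoc]
      simp only [List.singleton_append]
      rw [zadBChain_append2]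
      have : ¬ (Nat.digitChar (m % 10) < Nat.digitChar l) := by
        have h1 := digitChar_lt_iff (m % 10) (by omega) l (by omega)
        simp only [decide_eq_decide] at h1
        rw [h1]; omega
      simp [this]
    · have hlt : m % 10 < l := by omega
      have hcond : ¬ ((l : Int) ≤ PySem.Int.mod (m : Int) 10) := by
        rw [hmd]; exact_mod_cast hle
      simp only [hcond]
      rw [hfd, hmd]
      have hdclt : (decide (Nat.digitChar (m % 10) < Nat.digitChar l)) = true := by
        rw [digitChar_lt_iff (m % 10) (by omega) l (by omega)]
        simp [hlt]
      by_cases h10 : m < 10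
      · have hq : m / 10 = 0 := by omega
        have hmod : m % 10 = m := Nat.mod_eq_of_lt h10
        rw [hq, zadALoop]
        norm_num
        rw [hxs]
        have hxs0 : xs = [] := by
          have := congrArg List.length hxs
          rw [pvDigs] at this
          simp [h10] at this
          exact this
        subst hxs0
        simp [zadBChain, hdclt]
      · have hqpos : 0 < m / 10 := by omega
        rw [ih (m / 10) (by omega) hqpos (m % 10) (by omega)]
        rw [hxs, List.append_assoc]
        simp only [List.singleton_append]
        rw [zadBChain_append2]
        have hx2 : pvDigs m = pvDigs (m / 10) ++ [Nat.digitChar (m % 10)] := by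
          rw [pvDigs]; simp [h10]
        have : xs = pvDigs (m / 10) := by
          have := hxs.symm.trans hx2
          exact (List.append_left_injective _ this)
        rw [this, hdclt]
        simp

-- ===== VERDICT (by name: the statement is the Claim_ definition above) =====
theorem Zadanie_32_spec : Claim_equal_Zadanie_32 := by
  intro n _
  unfold Spec_Zadanie_32 Zadanie_32 Zadanie_32_alt
  by_cases hn : n ≤ 0
  · rw [zadALoop]
    simp [hn, show ¬ (n > 0) by omega]
  · have hn' : 0 < n := by omega
    simp only [show ¬ (n ≤ 0) by omega, if_neg, not_false_iff]
    have hm : n = ((n.toNat : Nat) : Int) := by omega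
    have h10c : ((10 : Nat) : Int) = (10 : Int) := by norm_num
    rw [hm, ← h10c, zadALoop_eq_chain n.toNat (by omega) 10 (by omega)]
    have htc : (PySem.Int.toStr ((n.toNat : Nat) : Int)).toList = pvDigs n.toNat := by
      rw [PySem.Int.toList_toStr]
      unfold PySem.Int.toChars
      simp only [show ¬ (((n.toNat : Nat) : Int) < 0) by omega, if_neg, not_false_iff]
      rw [Int.toNat_natCast, toDigits_eq_pvDigs]
    rw [htc]
    have hd : Nat.digitChar 10 = 'a' := by decide
    rw [hd, zadBChain_append_big (pvDigs n.toNat) (pvDigs_mem_lt n.toNat)]
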